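-- pv_equiv track=rewrite | github.com/pypi-data/pypi-mirror-115 | packages/wildgram/wildgram-0.4.0-py3-none-any.whl/wildgram/wildgram.py | pullOutTokens
-- ===== SOURCE A (Python) =====
-- def pullOutTokens(indexes, type="token"):
--     indexes = list(indexes)
--     if len(indexes) == 0:
--         return []
--     indexes = sorted(indexes)
--     prev = indexes[0]
--     ret = []
--     for i in range(len(indexes)-1):
--         if indexes[i]+1 != indexes[i+1]:
--             ret.append((prev,indexes[i]+1,type))
--             prev = indexes[i+1]
--     ret.append((prev, indexes[-1]+1,type))
--
--     return ret
-- ===== SOURCE B (Python) =====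
-- def pullOutTokens(indexes, type="token"):
--     # Build the runs back-to-front: walk the sorted values from largest to
--     # smallest, keeping the runs already formed (in output order); each value
--     # either extends the start of the front run or opens a new run before it.
--     runs = []
--     for v in reversed(sorted(indexes)):
--         if runs and runs[0][0] == v + 1:
--             runs[0] = (v, runs[0][1])
--         else:
--             runs.insert(0, (v, v + 1))
--     return [(start, end, type) for start, end in runs]
-- ===== Notes on version B (the rewrite author's own statement) =====
-- stated objective: alternative
-- what changed: Replaced A's forward prev/gap-detection loop that appends closed intervals by a back-to-front construction: traverse the sorted values in reverse and maintain the run list itself, extending the front run's start or prepending a new run.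
import Mathlib
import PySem

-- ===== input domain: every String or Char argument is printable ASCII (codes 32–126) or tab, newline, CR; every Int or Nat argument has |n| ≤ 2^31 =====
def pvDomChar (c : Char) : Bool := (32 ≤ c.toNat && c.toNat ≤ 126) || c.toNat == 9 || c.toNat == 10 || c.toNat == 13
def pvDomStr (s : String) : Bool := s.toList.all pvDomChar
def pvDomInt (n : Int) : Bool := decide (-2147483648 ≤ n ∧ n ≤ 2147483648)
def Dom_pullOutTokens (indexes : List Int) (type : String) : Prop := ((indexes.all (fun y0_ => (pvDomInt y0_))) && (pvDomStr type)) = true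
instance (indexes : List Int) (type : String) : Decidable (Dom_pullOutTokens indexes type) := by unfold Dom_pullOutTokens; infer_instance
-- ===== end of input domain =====

-- B replaces A's forward prev/gap loop by a back-to-front construction over the reversed sorted list (alternative decomposition, same cost).

-- ===== PORT A =====
-- literal port of A: sort, then for i in range(len-1) carry (prev, ret), close a run at each gap, final append with s[-1]+1
def pullOutTokens (indexes : List Int) (type : String) : List (Int × Int × String) :=
  if indexes.length = 0 then []
  else
    let s := PySem.List.sorted indexes (fun x => x) false
    let prev := PySem.List.pyGetD s 0 0
    let st := (PySem.List.pyRange 0 ((s.length : Int) - 1) 1).foldl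
      (fun (st : Int × List (Int × Int × String)) i =>
        if PySem.List.pyGetD s i 0 + 1 ≠ PySem.List.pyGetD s (i + 1) 0 then
          (PySem.List.pyGetD s (i + 1) 0, st.2 ++ [(st.1, PySem.List.pyGetD s i 0 + 1, type)])
        else st)
      (prev, ([] : List (Int × Int × String)))
    st.2 ++ [(st.1, PySem.List.pyGetD s (-1) 0 + 1, type)]

-- ===== PORT B =====
-- literal port of Source B's loop body: on value v, with the runs list in output order,
-- either extend the front run's start (runs[0] = (v, runs[0][1])) or insert a new run at the front
def pvStep (v : Int) (runs : List (Int × Int)) : List (Int × Int) :=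
  match runs with
  | (a, b) :: rest => if a = v + 1 then (v, b) :: rest else (v, v + 1) :: (a, b) :: rest
  | [] => [(v, v + 1)]

-- port of Source B: fold pvStep over the reversed sorted list, then tag each run with type
def pullOutTokens_alt (indexes : List Int) (type : String) : List (Int × Int × String) :=
  (((PySem.List.sorted indexes (fun x => x) false).reverse).foldl
      (fun runs v => pvStep v runs) []).map (fun p => (p.1, p.2, type))

-- ===== PRECONDITION & SPEC =====
def Spec_pullOutTokens (indexes : List Int) (type : String) (out : List (Int × Int × String)) : Prop := out = pullOutTokens_alt indexes type
instance (indexes : List Int) (type : String) (out : List (Int × Int × String)) : Decidable (Spec_pullOutTokens indexes type out) := by unfold Spec_pullOutTokens; infer_instance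

-- ===== CLAIM (what is proved, stated in full; the proofs are below) =====
def Claim_equal_pullOutTokens : Prop := ∀ (indexes : List Int) (type : String), Dom_pullOutTokens indexes type → Spec_pullOutTokens indexes type (pullOutTokens indexes type)

-- ===== LEMMAS AND PROOFS =====

-- proof device: the run decomposition of a sorted tail as pairs (start, end)
def pvGoP (start last : Int) : List Int → List (Int × Int)
  | [] => [(start, last + 1)]
  | x :: tl => if x = last + 1 then pvGoP start x tl else (start, last + 1) :: pvGoP x x tl

-- proof device: the same decomposition already tagged with type
def pvGo (type : String) (start last : Int) : List Int → List (Int × Int × String)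
  | [] => [(start, last + 1, type)]
  | x :: tl => if x = last + 1 then pvGo type start x tl else (start, last + 1, type) :: pvGo type x x tl

theorem pvGo_eq_map (type : String) :
    ∀ (rest : List Int) (start last : Int),
    pvGo type start last rest = (pvGoP start last rest).map (fun p => (p.1, p.2, type)) := by
  intro rest
  induction rest with
  | nil => intro start last; simp [pvGo, pvGoP]
  | cons x tl ih =>
    intro start last
    rw [pvGo, pvGoP]
    by_cases hx : x = last + 1
    · rw [if_pos hx, if_pos hx]; exact ih start x
    · rw [if_neg hx, if_neg hx]; simp [ih x x]

-- the head of pvGoP carries start; end and tail do not depend on start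
theorem pvGoP_head :
    ∀ (rest : List Int) (last : Int), ∃ e tlr, ∀ s, pvGoP s last rest = (s, e) :: tlr := by
  intro rest
  induction rest with
  | nil => intro last; exact ⟨last + 1, [], fun s => rfl⟩
  | cons x tl ih =>
    intro last
    by_cases hx : x = last + 1
    · obtain ⟨e, tlr, he⟩ := ih x
      exact ⟨e, tlr, fun s => by rw [pvGoP, if_pos hx]; exact he s⟩
    · exact ⟨last + 1, pvGoP x x tl, fun s => by rw [pvGoP, if_neg hx]⟩

-- B's foldr of pvStep over a nonempty sorted list is the run decomposition
theorem pvFoldr_eq_goP :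
    ∀ (t : List Int) (h : Int), (h :: t).foldr pvStep [] = pvGoP h h t := by
  intro t
  induction t with
  | nil => intro h; simp [pvStep, pvGoP]
  | cons x tl ih =>
    intro h
    have : (h :: x :: tl).foldr pvStep [] = pvStep h (pvGoP x x tl) := by
      rw [show (h :: x :: tl).foldr pvStep [] = pvStep h ((x :: tl).foldr pvStep []) from rfl, ih x]
    rw [this]
    obtain ⟨e, tlr, he⟩ := pvGoP_head tl x
    rw [he x, pvStep, pvGoP]
    by_cases hx : x = h + 1
    · rw [if_pos hx, if_pos hx, he h]
    · rw [if_neg hx, if_neg hx, ← he x]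

-- A's index loop over range(len-1) is the fold over adjacent pairs
theorem pvRangeFold_eq_zipFold {σ : Type} (g : σ → Int → Int → σ) :
    ∀ (t : List Int) (h : Int) (init : σ),
    (List.range t.length).foldl (fun st k => g st ((h :: t).getD k 0) ((h :: t).getD (k + 1) 0)) init
      = ((h :: t).zip t).foldl (fun st p => g st p.1 p.2) init := by
  intro t
  induction t with
  | nil => intro h init; simp
  | cons x tl ih =>
    intro h init
    simp only [List.length_cons, List.range_succ_eq_map, List.foldl_cons, List.foldl_map,
      List.zip_cons_cons, List.getD_cons_zero, List.getD_cons_succ]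
    exact ih x (g init h x)

-- A's pair fold with its (prev, ret) state, closed by the final append, is pvGo
theorem pvZipFold_eq_go (type : String) :
    ∀ (t : List Int) (a p : Int) (ret : List (Int × Int × String)),
    (((a :: t).zip t).foldl
        (fun (st : Int × List (Int × Int × String)) q =>
          if q.1 + 1 ≠ q.2 then (q.2, st.2 ++ [(st.1, q.1 + 1, type)]) else st)
        (p, ret)).2
      ++ [((((a :: t).zip t).foldl
        (fun (st : Int × List (Int × Int × String)) q =>
          if q.1 + 1 ≠ q.2 then (q.2, st.2 ++ [(st.1, q.1 + 1, type)]) else st)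
        (p, ret)).1, t.getLastD a + 1, type)]
      = ret ++ pvGo type p a t := by
  intro t
  induction t with
  | nil => intro a p ret; simp [pvGo]
  | cons x tl ih =>
    intro a p ret
    simp only [List.zip_cons_cons, List.foldl_cons]
    by_cases hx : x = a + 1
    · rw [if_neg (not_not_intro hx.symm), pvGo, if_pos hx, List.getLastD_cons]
      exact ih x p ret
    · rw [if_pos (fun h => hx h.symm), pvGo, if_neg hx, List.getLastD_cons,
        ih x x (ret ++ [(p, a + 1, type)])]
      simp

-- getLastD names s[-1] on a nonempty list
theorem pvLast_eq (h : Int) (t : List Int) :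
    PySem.List.pyGetD (h :: t) (-1) (0 : Int) = t.getLastD h := by
  have := PySem.List.pyGetD_neg_one (xs := h :: t) (d := (0 : Int)) (by simp)
  rw [List.getLast_eq_getLastD] at this
  simpa using this

-- ===== VERDICT (by name: the statement is the Claim_ definition above) =====
theorem pullOutTokens_spec : Claim_equal_pullOutTokens := by
  intro indexes type _
  unfold Spec_pullOutTokens
  have hlen : indexes.length = (PySem.List.sorted indexes (fun x => x) false).length :=
    (PySem.List.length_sorted ..).symm
  cases hs : PySem.List.sorted indexes (fun x => x) false with
  | nil =>
    have h0 : indexes.length = 0 := by rw [hlen, hs]; rfl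
    simp [pullOutTokens, pullOutTokens_alt, hs, h0]
  | cons h t =>
    have hne : ¬ indexes.length = 0 := by rw [hlen, hs]; simp
    have hB : pullOutTokens_alt indexes type = pvGo type h h t := by
      simp only [pullOutTokens_alt, hs]
      rw [List.foldl_reverse, pvFoldr_eq_goP, ← pvGo_eq_map]
    have hA : pullOutTokens indexes type = [] ++ pvGo type h h t := by
      simp only [pullOutTokens, hs, if_neg hne]
      rw [pvLast_eq, PySem.List.pyGetD_zero_cons]
      have hrange : PySem.List.pyRange 0 (((h :: t).length : Int) - 1) 1
          = (List.range t.length).map (fun k => ((k : Nat) : Int)) := by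
        rw [PySem.List.pyRange_one]
        simp
      rw [hrange, List.foldl_map]
      have hstep : (fun (st : Int × List (Int × Int × String)) (k : Nat) =>
            if PySem.List.pyGetD (h :: t) ((k : Nat) : Int) 0 + 1 ≠ PySem.List.pyGetD (h :: t) (((k : Nat) : Int) + 1) 0 then
              (PySem.List.pyGetD (h :: t) (((k : Nat) : Int) + 1) 0,
                st.2 ++ [(st.1, PySem.List.pyGetD (h :: t) ((k : Nat) : Int) 0 + 1, type)])
            else st)
          = (fun (st : Int × List (Int × Int × String)) (k : Nat) =>
            if (h :: t).getD k 0 + 1 ≠ (h :: t).getD (k + 1) 0 then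
              ((h :: t).getD (k + 1) 0, st.2 ++ [(st.1, (h :: t).getD k 0 + 1, type)])
            else st) := by
        funext st k
        have hcast : (((k : Nat) : Int) + 1) = (((k + 1 : Nat) : Nat) : Int) := by push_cast; ring
        rw [hcast, PySem.List.pyGetD_natCast, PySem.List.pyGetD_natCast]
      rw [hstep,
        pvRangeFold_eq_zipFold
          (fun (st : Int × List (Int × Int × String)) a b =>
            if a + 1 ≠ b then (b, st.2 ++ [(st.1, a + 1, type)]) else st) t h (h, [])]
      exact pvZipFold_eq_go type t h h []
    rw [hA, hB, List.nil_append]
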